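-- pv_equiv track=rewrite | github.com/nens/turtle-rural | rural_waterbalance.py | max_gpg
-- ===== SOURCE A (Python) =====
-- def max_gpg(tuples_list):
--     """
--     """
--     main_gpg = ""
--     max_area = 0
--     sum_area = 0
--
--     for peilgebied in tuples_list:
--         sum_area += peilgebied[1]
--         if peilgebied[1] > max_area:
--             main_gpg = peilgebied[0]
--             max_area = peilgebied[1]
--
--     return main_gpg, sum_area
-- ===== SOURCE B (Python) =====
-- def max_gpg(tuples_list):
--     # sort descending by area (stable: ties keep the earlier tuple), winner = head
--     ranked = sorted(tuples_list, key=lambda t: t[1], reverse=True)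
--     total = sum(area for _, area in tuples_list)
--     if ranked and ranked[0][1] > 0:
--         return ranked[0][0], total
--     return "", total
-- ===== Notes on version B (the rewrite author's own statement) =====
-- stated objective: alternative
-- what changed: Replaces A's single fused accumulation loop (running name/max/sum state) with a sort-based strategy: stable-sort the tuples by area descending and read the winner off the head (stability preserves A's first-occurrence tie rule), with the total computed as a separate sum and the >0 sentinel applied once at the end.
import Mathlib
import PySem

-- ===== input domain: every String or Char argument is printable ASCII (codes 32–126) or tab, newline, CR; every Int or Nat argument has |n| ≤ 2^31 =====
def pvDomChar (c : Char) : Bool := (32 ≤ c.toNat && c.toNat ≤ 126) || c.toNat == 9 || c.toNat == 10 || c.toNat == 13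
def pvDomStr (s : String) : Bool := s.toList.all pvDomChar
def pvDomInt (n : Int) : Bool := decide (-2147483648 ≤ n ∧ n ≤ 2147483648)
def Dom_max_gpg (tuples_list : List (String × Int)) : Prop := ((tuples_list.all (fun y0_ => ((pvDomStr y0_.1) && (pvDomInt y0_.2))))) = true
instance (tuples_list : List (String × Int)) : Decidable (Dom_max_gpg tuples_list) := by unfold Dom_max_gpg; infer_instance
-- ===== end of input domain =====

-- B replaces A's fused running-max/sum loop with a sort-based strategy: stable-sort the
-- tuples by area descending and read the winner off the head, summing areas separately (alternative).


-- ===== PORT A =====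
-- A's loop: one fold carrying (main_gpg, max_area, sum_area)
def max_gpg (tuples_list : List (String × Int)) : String × Int :=
  let st := tuples_list.foldl
    (fun (acc : String × Int × Int) (peilgebied : String × Int) =>
      let sum_area := acc.2.2 + peilgebied.2
      if peilgebied.2 > acc.2.1 then (peilgebied.1, peilgebied.2, sum_area)
      else (acc.1, acc.2.1, sum_area))
    ("", 0, 0)
  (st.1, st.2.2)

-- ===== PORT B =====
-- sorted(tuples_list, key=lambda t: t[1], reverse=True); winner = head if its area > 0
def max_gpg_alt (tuples_list : List (String × Int)) : String × Int :=
  let ranked := PySem.List.sorted tuples_list (fun t => t.2) true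
  let total := (tuples_list.map (fun t => t.2)).sum
  match ranked with
  | r :: _ => if r.2 > 0 then (r.1, total) else ("", total)
  | [] => ("", total)

-- ===== PRECONDITION & SPEC =====
def Spec_max_gpg (tuples_list : List (String × Int)) (out : String × Int) : Prop := out = max_gpg_alt tuples_list
instance (tuples_list : List (String × Int)) (out : String × Int) : Decidable (Spec_max_gpg tuples_list out) := by unfold Spec_max_gpg; infer_instance

-- ===== CLAIM =====
def Claim_equal_max_gpg : Prop := ∀ (tuples_list : List (String × Int)), Dom_max_gpg tuples_list → Spec_max_gpg tuples_list (max_gpg tuples_list)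

-- ===== LEMMAS AND PROOFS =====

-- the (name, max) part of A's loop, sum stripped off: running leftmost max
def pairStep (q : String × Int) (x : String × Int) : String × Int :=
  if x.2 > q.2 then x else q

lemma afold_eq (xs : List (String × Int)) : ∀ (m : String) (mx s : Int),
    xs.foldl
      (fun (acc : String × Int × Int) (p : String × Int) =>
        let sum_area := acc.2.2 + p.2
        if p.2 > acc.2.1 then (p.1, p.2, sum_area) else (acc.1, acc.2.1, sum_area))
      (m, mx, s)
    = ((xs.foldl pairStep (m, mx)).1, (xs.foldl pairStep (m, mx)).2,
        s + (xs.map (fun t => t.2)).sum) := by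
  induction xs with
  | nil => intro m mx s; simp
  | cons x t ih =>
    intro m mx s
    simp only [List.foldl_cons, List.map_cons, List.sum_cons]
    by_cases h : x.2 > mx
    · simp [pairStep, h, ih]; ring
    · simp [pairStep, h, ih]; ring

-- head of the descending insertion step is exactly A's running-max step
lemma insertBy_rev_cons (x m : String × Int) (rest : List (String × Int)) :
    PySem.List.insertBy (fun a b : String × Int => decide (b.2 < a.2)) x (m :: rest)
      = if x.2 > m.2 then x :: m :: rest
        else m :: PySem.List.insertBy (fun a b : String × Int => decide (b.2 < a.2)) x rest := by
  simp only [PySem.List.insertBy]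
  by_cases h : m.2 < x.2 <;> simp [h]

-- folding descending insertions into a nonempty accumulator keeps A's leftmost max at the head
lemma foldl_insertBy_head (xs : List (String × Int)) : ∀ (m : String × Int) (rest : List (String × Int)),
    ∃ rest', xs.foldl
        (fun acc x => PySem.List.insertBy (fun a b : String × Int => decide (b.2 < a.2)) x acc)
        (m :: rest)
      = (xs.foldl pairStep m) :: rest' := by
  induction xs with
  | nil => intro m rest; exact ⟨rest, rfl⟩
  | cons x t ih =>
    intro m rest
    simp only [List.foldl_cons, insertBy_rev_cons, pairStep]
    by_cases h : x.2 > m.2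
    · simpa [h] using ih x (m :: rest)
    · simpa [h] using ih m (PySem.List.insertBy (fun a b : String × Int => decide (b.2 < a.2)) x rest)

-- the head of sorted(y::t, key=area, reverse=True) is A's leftmost max of y::t
lemma sorted_rev_head (y : String × Int) (t : List (String × Int)) :
    ∃ rest, PySem.List.sorted (y :: t) (fun p => p.2) true = (t.foldl pairStep y) :: rest := by
  rw [PySem.List.sorted_rev_eq_foldl_insertBy]
  simpa using foldl_insertBy_head t y []

-- A's sentinel-started fold is the real fold with the >0 guard applied at the end
lemma sentinel_fold (t : List (String × Int)) : ∀ (q : String × Int),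
    t.foldl pairStep (if q.2 > 0 then q else ("", 0))
    = (if (t.foldl pairStep q).2 > 0 then t.foldl pairStep q else ("", 0)) := by
  induction t with
  | nil => intro q; rfl
  | cons x t ih =>
    intro q
    simp only [List.foldl_cons]
    have step : pairStep (if q.2 > 0 then q else ("", 0)) x
        = (if (pairStep q x).2 > 0 then pairStep q x else ("", (0 : Int))) := by
      simp only [pairStep]
      split_ifs <;> simp_all <;> omega
    rw [step, ih]

theorem max_gpg_spec_aux (xs : List (String × Int)) : max_gpg xs = max_gpg_alt xs := by
  cases xs with
  | nil => rfl
  | cons y t =>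
    obtain ⟨rest, hs⟩ := sorted_rev_head y t
    simp only [max_gpg, max_gpg_alt, List.foldl_cons, hs]
    have h0 : (if y.2 > (0:Int) then (y.1, y.2, (0:Int) + y.2) else ("", (0:Int), (0:Int) + y.2))
        = ((if y.2 > (0:Int) then y else ("", 0)).1, (if y.2 > (0:Int) then y else ("", 0)).2, (0:Int) + y.2) := by
      split_ifs <;> rfl
    rw [h0, afold_eq, sentinel_fold]
    split_ifs with h <;> simp [List.sum_cons]

-- ===== VERDICT =====
theorem max_gpg_spec : Claim_equal_max_gpg := by
  intro xs _
  exact max_gpg_spec_aux xs
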